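-- pv_equiv track=rewrite | github.com/Bjorn-Eriksson/CIS121 | Week 6/Week6ClassNotes.py | string_to_list_with_vowels
-- ===== SOURCE A (Python) =====
-- def string_to_list_with_vowels(word):
--     words = []
--     #collect a word
--     built_word = ''
--     vowel_count = 0
--     for letter in word:
--         if letter == ' ':
--             if vowel_count >= 2:
--                 #add built_world into the list
--                 words.append(built_word)
--             built_word = ''
--             vowel_count = 0 #This is so the counter gets reset for each word
--         else:
--             built_word += letter
--             if letter in 'aeiou':
--                 vowel_count += 1
--     if vowel_count >= 2:
--         words.append(built_word)
--     return words
-- ===== SOURCE B (Python) =====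
-- def string_to_list_with_vowels(word):
--     return [seg for seg in word.split(' ') if sum(c in 'aeiou' for c in seg) >= 2]
-- ===== Notes on version B (the rewrite author's own statement) =====
-- stated objective: idiomatic
-- what changed: Replaces the manual character-by-character word builder and vowel counter with a split on a single space into segments followed by a comprehension keeping segments with at least two vowels.
import Mathlib
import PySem

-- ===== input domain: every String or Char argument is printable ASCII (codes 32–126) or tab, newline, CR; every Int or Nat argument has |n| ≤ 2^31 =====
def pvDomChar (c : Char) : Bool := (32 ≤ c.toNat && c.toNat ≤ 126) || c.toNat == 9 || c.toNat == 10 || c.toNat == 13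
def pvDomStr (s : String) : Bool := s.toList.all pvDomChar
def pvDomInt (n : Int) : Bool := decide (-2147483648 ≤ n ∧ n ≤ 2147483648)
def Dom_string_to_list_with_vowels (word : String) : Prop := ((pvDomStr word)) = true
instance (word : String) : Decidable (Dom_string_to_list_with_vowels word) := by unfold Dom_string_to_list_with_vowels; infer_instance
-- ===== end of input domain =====

-- B replaces A's single char-level accumulator loop with split(' ') followed by a
-- per-segment vowel-count filter (more idiomatic; same O(n) cost).

-- the literal string 'aeiou' both Pythons test membership in
def pvVowels : List Char := ['a', 'e', 'i', 'o', 'u']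

-- ===== PORT A =====
-- loop state: (words, built_word, vowel_count)
def pvStepA (st : List (List Char) × List Char × Int) (letter : Char) :
    List (List Char) × List Char × Int :=
  match st with
  | (words, built, v) =>
    if letter = ' ' then
      ((if 2 ≤ v then words ++ [built] else words), [], 0)
    else
      (words, built ++ [letter], if letter ∈ pvVowels then v + 1 else v)

def string_to_list_with_vowels (word : String) : List String :=
  let r := word.toList.foldl pvStepA ([], [], 0)
  (if 2 ≤ r.2.2 then r.1 ++ [r.2.1] else r.1).map String.ofList

-- ===== PORT B =====
-- sum(c in 'aeiou' for c in seg)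
def pvVowelCount (seg : List Char) : Int :=
  (seg.map (fun c => if c ∈ pvVowels then (1 : Int) else 0)).sum

def string_to_list_with_vowels_alt (word : String) : List String :=
  ((PySem.Chars.splitOn word.toList [' ']).filter
    (fun seg => 2 ≤ pvVowelCount seg)).map String.ofList

-- ===== PRECONDITION & SPEC =====
def Spec_string_to_list_with_vowels (word : String) (out : List String) : Prop := out = string_to_list_with_vowels_alt word
instance (word : String) (out : List String) : Decidable (Spec_string_to_list_with_vowels word out) := by unfold Spec_string_to_list_with_vowels; infer_instance

-- ===== CLAIM (what is proved, stated in full; the proofs are below) =====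
def Claim_equal_string_to_list_with_vowels : Prop := ∀ (word : String), Dom_string_to_list_with_vowels word → Spec_string_to_list_with_vowels word (string_to_list_with_vowels word)

-- ===== LEMMAS AND PROOFS =====

-- prepend w to the first piece (or start one)
def pvConsHead (w : List Char) : List (List Char) → List (List Char)
  | [] => [w]
  | x :: xs => (w ++ x) :: xs

-- structural single-space split
def pvSplit : List Char → List (List Char)
  | [] => [[]]
  | c :: rest => if c = ' ' then [] :: pvSplit rest else pvConsHead [c] (pvSplit rest)

lemma pvSplit_ne_nil (l : List Char) : pvSplit l ≠ [] := by
  cases l with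
  | nil => simp [pvSplit]
  | cons c rest =>
    simp only [pvSplit]
    split
    · simp
    · cases h : pvSplit rest <;> simp [pvConsHead]

lemma pvConsHead_nil (L : List (List Char)) (h : L ≠ []) : pvConsHead [] L = L := by
  cases L with
  | nil => exact absurd rfl h
  | cons x xs => simp [pvConsHead]

lemma pvConsHead_consHead (a b : List Char) (L : List (List Char)) :
    pvConsHead a (pvConsHead b L) = pvConsHead (a ++ b) L := by
  cases L <;> simp [pvConsHead]

lemma pvSplitOn_go (fuel : Nat) :
    ∀ (l cur : List Char) (acc : List (List Char)), l.length < fuel →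
      PySem.Chars.splitOn.go [' '] fuel l cur acc =
        acc.reverse ++ pvConsHead cur.reverse (pvSplit l) := by
  induction fuel with
  | zero => intro l cur acc h; omega
  | succ n ih =>
    intro l cur acc h
    cases l with
    | nil => simp [PySem.Chars.splitOn.go, pvSplit, pvConsHead]
    | cons c rest =>
      by_cases hc : c = ' '
      · subst hc
        rw [show PySem.Chars.splitOn.go [' '] (n+1) (' ' :: rest) cur acc =
              PySem.Chars.splitOn.go [' '] n rest [] (cur.reverse :: acc) by
            simp [PySem.Chars.splitOn.go, List.isPrefixOf]]
        rw [ih rest [] (cur.reverse :: acc) (by simpa using Nat.lt_of_succ_lt_succ h)]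
        simp only [pvSplit, List.reverse_nil, pvConsHead_nil _ (pvSplit_ne_nil rest)]
        simp [pvConsHead]
      · rw [show PySem.Chars.splitOn.go [' '] (n+1) (c :: rest) cur acc =
              PySem.Chars.splitOn.go [' '] n rest (c :: cur) acc by
            simp [PySem.Chars.splitOn.go, List.isPrefixOf, Ne.symm hc]]
        rw [ih rest (c :: cur) acc (by simpa using Nat.lt_of_succ_lt_succ h)]
        simp [pvSplit, hc, pvConsHead_consHead]

lemma pvSplitOn_eq (l : List Char) :
    PySem.Chars.splitOn l [' '] = pvSplit l := by
  have := pvSplitOn_go (l.length + 1) l [] [] (Nat.lt_succ_self _)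
  simpa [PySem.Chars.splitOn, pvConsHead_nil _ (pvSplit_ne_nil l)] using this

lemma pvVowelCount_append (b : List Char) (c : Char) :
    pvVowelCount (b ++ [c]) =
      (if c ∈ pvVowels then pvVowelCount b + 1 else pvVowelCount b) := by
  by_cases h : c ∈ pvVowels <;> simp [pvVowelCount, h]

lemma pvVowelCount_nil : pvVowelCount [] = 0 := by simp [pvVowelCount]

-- the epilogue of A's loop
def pvFinish (r : List (List Char) × List Char × Int) : List (List Char) :=
  if 2 ≤ r.2.2 then r.1 ++ [r.2.1] else r.1

lemma pvLoopA (l : List Char) : ∀ (ws : List (List Char)) (b : List Char),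
    pvFinish (l.foldl pvStepA (ws, b, pvVowelCount b)) =
      ws ++ (pvConsHead b (pvSplit l)).filter (fun w => 2 ≤ pvVowelCount w) := by
  induction l with
  | nil =>
    intro ws b
    by_cases h : 2 ≤ pvVowelCount b <;>
      simp [pvFinish, pvSplit, pvConsHead, List.filter, h]
  | cons c rest ih =>
    intro ws b
    by_cases hc : c = ' '
    · subst hc
      have e : pvStepA (ws, b, pvVowelCount b) ' ' =
          ((if 2 ≤ pvVowelCount b then ws ++ [b] else ws), [], pvVowelCount []) := by
        simp [pvStepA, pvVowelCount_nil]
      rw [List.foldl_cons, e, ih]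
      rw [pvConsHead_nil _ (pvSplit_ne_nil rest)]
      by_cases hv : 2 ≤ pvVowelCount b <;>
        simp [pvSplit, pvConsHead, hv]
    · have e : pvStepA (ws, b, pvVowelCount b) c =
          (ws, b ++ [c], pvVowelCount (b ++ [c])) := by
        simp [pvStepA, hc, pvVowelCount_append]
      rw [List.foldl_cons, e, ih]
      simp [pvSplit, hc, pvConsHead_consHead]

-- ===== VERDICT (by name: the statement is the Claim_ definition above) =====
theorem string_to_list_with_vowels_spec : Claim_equal_string_to_list_with_vowels := by
  intro word _
  unfold Spec_string_to_list_with_vowels string_to_list_with_vowels string_to_list_with_vowels_alt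
  rw [pvSplitOn_eq]
  have h := pvLoopA word.toList [] []
  rw [pvConsHead_nil _ (pvSplit_ne_nil word.toList)] at h
  simp only [pvVowelCount_nil, pvFinish, List.nil_append] at h
  simp only [h]
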